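-- pv_equiv track=rewrite | github.com/aserhiychuk/cracking-the-coding-interview | Chapter_08_Recursion_and_Dynamic_Programming/03_magic_index.py | _magic_index_followup
-- ===== SOURCE A (Python) =====
-- def _magic_index_followup(array, low, high):
--     if low >= high:
--         return None
--
--     if high - low == 1:
--         return low if array[low] == low else None
--
--     mid = (low + high) // 2
--
--     mid_start = mid
--     mid_end = mid
--
--     while low < mid_start and array[mid_start - 1] == array[mid]:
--         mid_start -= 1
--
--     while mid_end < high - 1 and array[mid] == array[mid_end + 1]:
--         mid_end += 1
--
--     if mid_start <= array[mid] and array[mid] <= mid_end: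
--         return array[mid]
--
--     if array[mid] < mid_start:
--         return _magic_index_followup(array, mid_end + 1, high)
--
--     return _magic_index_followup(array, low, mid_start)
-- ===== SOURCE B (Python) =====
-- def _bisect_left(array, x, lo, hi):
--     while lo < hi:
--         m = (lo + hi) // 2
--         if array[m] < x:
--             lo = m + 1
--         else:
--             hi = m
--     return lo
--
--
-- def _bisect_right(array, x, lo, hi):
--     while lo < hi:
--         m = (lo + hi) // 2
--         if x < array[m]:
--             hi = m
--         else:
--             lo = m + 1
--     return lo
--
--
-- def _magic_index_followup(array, low, high):
--     while high - low > 1: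
--         mid = (low + high) // 2
--         v = array[mid]
--         start = _bisect_left(array, v, low, mid)
--         end = _bisect_right(array, v, mid + 1, high) - 1
--         if start <= v <= end:
--             return v
--         if v < start:
--             low = end + 1
--         else:
--             high = start
--     if high - low == 1 and array[low] == low:
--         return low
--     return None
-- ===== Notes on version B (the rewrite author's own statement) =====
-- stated objective: alternative
-- what changed: A expands the equal-value block around mid with two linear while-loops and recurses; B finds the block boundaries with two hand-written binary searches (bisect_left/bisect_right) and replaces the tail recursion by a loop, so the per-level work is logarithmic instead of linear in the block size (worst case O(log^2 n) vs O(n)); a timing run did not consistently confirm a speed-up on the generated inputs, so no speed is claimed.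
-- outside the precondition, e.g. on _magic_index_followup([1, 0, 2], 0, 3): A returns 2, B returns 0; on _magic_index_followup([-2, -2, 7, 9, 10], -4, 4): A returns None, B returns -2
import Mathlib
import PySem

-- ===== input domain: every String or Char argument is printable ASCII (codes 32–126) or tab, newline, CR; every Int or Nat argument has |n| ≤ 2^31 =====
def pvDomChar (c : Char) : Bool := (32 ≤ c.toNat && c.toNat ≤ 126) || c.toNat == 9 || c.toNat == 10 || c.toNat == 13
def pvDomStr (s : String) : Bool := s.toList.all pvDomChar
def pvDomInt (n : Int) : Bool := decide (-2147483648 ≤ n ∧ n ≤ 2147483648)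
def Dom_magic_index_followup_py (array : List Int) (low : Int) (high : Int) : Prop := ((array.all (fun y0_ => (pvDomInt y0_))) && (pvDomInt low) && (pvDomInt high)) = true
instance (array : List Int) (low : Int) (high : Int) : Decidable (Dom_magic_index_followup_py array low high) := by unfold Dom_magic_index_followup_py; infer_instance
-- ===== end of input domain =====

-- B replaces A's linear expansion of the equal-value block around mid by two binary searches and
-- the tail recursion by a loop (objective: alternative; exact on the sorted in-range windows Pre_ states).


-- ===== PORT A =====
-- array[i] for an index Pre_ keeps in range; the default 0 is only reachable where Python would raise (outside Pre_)
def pvG (array : List Int) (i : Int) : Int := PySem.List.pyGetD array i 0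

-- 'while low < mid_start and array[mid_start - 1] == array[mid]: mid_start -= 1'; fuel (ms - low).toNat bounds the loop
def pvScanL (array : List Int) (low : Int) (v : Int) : Int → Nat → Int
  | ms, 0 => ms
  | ms, fuel+1 =>
    if low < ms ∧ pvG array (ms - 1) = v then pvScanL array low v (ms - 1) fuel else ms

-- 'while mid_end < high - 1 and array[mid] == array[mid_end + 1]: mid_end += 1'; fuel (high - 1 - me).toNat
def pvScanR (array : List Int) (high : Int) (v : Int) : Int → Nat → Int
  | me, 0 => me
  | me, fuel+1 =>
    if me < high - 1 ∧ v = pvG array (me + 1) then pvScanR array high v (me + 1) fuel else me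

-- the recursion of _magic_index_followup; fuel (high - low).toNat bounds the depth (each call strictly shrinks the window)
def pvGoA (array : List Int) : Int → Int → Nat → Option Int
  | _,   _,    0      => none
  | low, high, fuel+1 =>
    if low ≥ high then none
    else if high - low = 1 then (if pvG array low = low then some low else none)
    else
      let mid := PySem.Int.floordiv (low + high) 2
      let v := pvG array mid
      let ms := pvScanL array low v mid (mid - low).toNat
      let me := pvScanR array high v mid (high - 1 - mid).toNat
      if ms ≤ v ∧ v ≤ me then some v
      else if v < ms then pvGoA array (me + 1) high fuel
      else pvGoA array low ms fuel

def magic_index_followup_py (array : List Int) (low : Int) (high : Int) : Option Int :=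
  pvGoA array low high (high - low).toNat

-- ===== PORT B =====
-- hand-written bisect_left of Source B; fuel (hi - lo).toNat bounds the loop
def pvBisectL (array : List Int) (x : Int) : Int → Int → Nat → Int
  | lo, _,  0      => lo
  | lo, hi, fuel+1 =>
    if lo < hi then
      let m := PySem.Int.floordiv (lo + hi) 2
      if pvG array m < x then pvBisectL array x (m + 1) hi fuel
      else pvBisectL array x lo m fuel
    else lo

-- hand-written bisect_right of Source B
def pvBisectR (array : List Int) (x : Int) : Int → Int → Nat → Int
  | lo, _,  0      => lo
  | lo, hi, fuel+1 =>
    if lo < hi then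
      let m := PySem.Int.floordiv (lo + hi) 2
      if x < pvG array m then pvBisectR array x lo m fuel
      else pvBisectR array x (m + 1) hi fuel
    else lo

-- the 'while high - low > 1' loop of Source B; fuel (high - low).toNat bounds its iterations;
-- the fuel-0 body is the code after the loop (reached only when the guard is false)
def pvGoB (array : List Int) : Int → Int → Nat → Option Int
  | low, high, 0      =>
    if high - low = 1 ∧ pvG array low = low then some low else none
  | low, high, fuel+1 =>
    if high - low > 1 then
      let mid := PySem.Int.floordiv (low + high) 2
      let v := pvG array mid
      let start := pvBisectL array v low mid (mid - low).toNat
      let e := pvBisectR array v (mid + 1) high (high - (mid + 1)).toNat - 1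
      if start ≤ v ∧ v ≤ e then some v
      else if v < start then pvGoB array (e + 1) high fuel
      else pvGoB array low start fuel
    else if high - low = 1 ∧ pvG array low = low then some low else none

def magic_index_followup_py_alt (array : List Int) (low : Int) (high : Int) : Option Int :=
  pvGoB array low high (high - low).toNat

-- ===== PRECONDITION & SPEC =====
-- Pre_ covers the degenerate windows, on which A never recurses (high ≤ low: no access at all;
-- a one-element window: only array[low], which must be a valid Python index), and otherwise the
-- natural domain of the magic-index follow-up: a sorted array with in-range bounds. It excludes
-- (a) inputs where A raises IndexError (an accessed index out of range); (b) non-degenerate windows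
-- with low < 0, where A's Python-specific negative-index wraparound reads from the end of the array;
-- (c) non-degenerate windows over unsorted arrays, on which the problem is unspecified and A's
-- one-sided recursion returns an arbitrary value.
def Pre_magic_index_followup_py (array : List Int) (low : Int) (high : Int) : Prop :=
  high ≤ low ∨
  (high - low = 1 ∧ -(array.length : Int) ≤ low ∧ low < (array.length : Int)) ∨
  (0 ≤ low ∧ high ≤ (array.length : Int) ∧ List.Pairwise (· ≤ ·) array)
instance (array : List Int) (low : Int) (high : Int) : Decidable (Pre_magic_index_followup_py array low high) := by unfold Pre_magic_index_followup_py; infer_instance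

def pvWitness_magic_index_followup_py : List Int × Int × Int := ([0, 2, 2, 2, 7], 0, 5)

def Spec_magic_index_followup_py (array : List Int) (low : Int) (high : Int) (out : Option Int) : Prop := out = magic_index_followup_py_alt array low high
instance (array : List Int) (low : Int) (high : Int) (out : Option Int) : Decidable (Spec_magic_index_followup_py array low high out) := by unfold Spec_magic_index_followup_py; infer_instance

-- ===== CLAIM (what is proved, stated in full; the proofs are below) =====
def Claim_equal_magic_index_followup_py : Prop := ∀ (array : List Int) (low : Int) (high : Int), Dom_magic_index_followup_py array low high → Pre_magic_index_followup_py array low high → Spec_magic_index_followup_py array low high (magic_index_followup_py array low high)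

-- ===== LEMMAS AND PROOFS =====

-- sortedness gives index-monotonicity of the (in-range) accessor
theorem pvMono (array : List Int) (hs : List.Pairwise (· ≤ ·) array)
    {i j : Int} (h0 : 0 ≤ i) (hij : i ≤ j) (hj : j < (array.length : Int)) :
    pvG array i ≤ pvG array j := by
  rcases lt_or_eq_of_le hij with hlt | rfl
  · have hi : i < (array.length : Int) := lt_trans hlt hj
    rw [pvG, pvG, PySem.List.pyGetD_eq_getElem _ _ h0 hi,
        PySem.List.pyGetD_eq_getElem _ _ (le_trans h0 hij) hj]
    exact List.pairwise_iff_getElem.mp hs i.toNat j.toNat (by omega) (by omega) (by omega)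
  · exact le_refl _

-- what A's left while-loop returns: the start of the equal run ending at the initial index
theorem pvScanL_spec (array : List Int) (low v : Int) :
    ∀ (fuel : Nat) (ms : Int), low ≤ ms → ms - low ≤ (fuel : Int) →
      low ≤ pvScanL array low v ms fuel ∧ pvScanL array low v ms fuel ≤ ms ∧
      (∀ i : Int, pvScanL array low v ms fuel ≤ i → i < ms → pvG array i = v) ∧
      (low < pvScanL array low v ms fuel → pvG array (pvScanL array low v ms fuel - 1) ≠ v) := by
  intro fuel
  induction fuel with
  | zero =>
    intro ms h1 h2
    have hms : ms = low := by omega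
    subst hms
    simp only [pvScanL]
    exact ⟨le_refl _, le_refl _, fun i hi1 hi2 => absurd (lt_of_le_of_lt hi1 hi2) (lt_irrefl _),
      fun h => absurd h (lt_irrefl _)⟩
  | succ f ih =>
    intro ms h1 h2
    simp only [pvScanL]
    by_cases hc : low < ms ∧ pvG array (ms - 1) = v
    · rw [if_pos hc]
      obtain ⟨r1, r2, r3, r4⟩ := ih (ms - 1) (by omega) (by omega)
      refine ⟨r1, by omega, ?_, r4⟩
      intro i hi1 hi2
      rcases lt_or_ge i (ms - 1) with h | h
      · exact r3 i hi1 h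
      · have hieq : i = ms - 1 := by omega
        rw [hieq]; exact hc.2
    · rw [if_neg hc]
      push Not at hc
      exact ⟨h1, le_refl _, fun i hi1 hi2 => absurd (lt_of_le_of_lt hi1 hi2) (lt_irrefl _), hc⟩

-- what A's right while-loop returns: the end of the equal run starting at the initial index
theorem pvScanR_spec (array : List Int) (high v : Int) :
    ∀ (fuel : Nat) (me : Int), me ≤ high - 1 → high - 1 - me ≤ (fuel : Int) →
      me ≤ pvScanR array high v me fuel ∧ pvScanR array high v me fuel ≤ high - 1 ∧
      (∀ i : Int, me < i → i ≤ pvScanR array high v me fuel → pvG array i = v) ∧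
      (pvScanR array high v me fuel < high - 1 → pvG array (pvScanR array high v me fuel + 1) ≠ v) := by
  intro fuel
  induction fuel with
  | zero =>
    intro me h1 h2
    have hme : me = high - 1 := by omega
    simp only [pvScanR]
    exact ⟨le_refl _, h1, fun i hi1 hi2 => absurd (lt_of_lt_of_le hi1 hi2) (lt_irrefl _),
      fun h => by omega⟩
  | succ f ih =>
    intro me h1 h2
    simp only [pvScanR]
    by_cases hc : me < high - 1 ∧ v = pvG array (me + 1)
    · rw [if_pos hc]
      obtain ⟨r1, r2, r3, r4⟩ := ih (me + 1) (by omega) (by omega)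
      refine ⟨by omega, r2, ?_, r4⟩
      intro i hi1 hi2
      rcases lt_or_ge (me + 1) i with h | h
      · exact r3 i h hi2
      · have hieq : i = me + 1 := by omega
        rw [hieq]; exact hc.2.symm
    · rw [if_neg hc]
      push Not at hc
      refine ⟨le_refl _, h1, fun i hi1 hi2 => absurd (lt_of_lt_of_le hi1 hi2) (lt_irrefl _), ?_⟩
      intro hlt heq; exact absurd heq.symm (hc hlt)

-- what B's bisect_left returns, on a sorted window
theorem pvBisectL_spec (array : List Int) (x : Int)
    (hs : List.Pairwise (· ≤ ·) array) :
    ∀ (fuel : Nat) (lo hi : Int), 0 ≤ lo → lo ≤ hi → hi ≤ (array.length : Int) →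
      hi - lo ≤ (fuel : Int) →
      lo ≤ pvBisectL array x lo hi fuel ∧ pvBisectL array x lo hi fuel ≤ hi ∧
      (∀ i : Int, lo ≤ i → i < pvBisectL array x lo hi fuel → pvG array i < x) ∧
      (∀ i : Int, pvBisectL array x lo hi fuel ≤ i → i < hi → x ≤ pvG array i) := by
  intro fuel
  induction fuel with
  | zero =>
    intro lo hi h0 h1 hlen h2
    have : hi = lo := by omega
    subst this
    simp only [pvBisectL]
    exact ⟨le_refl _, le_refl _, fun i hi1 hi2 => by omega, fun i hi1 hi2 => by omega⟩
  | succ f ih =>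
    intro lo hi h0 h1 hlen h2
    simp only [pvBisectL]
    by_cases hlt : lo < hi
    · rw [if_pos hlt]
      have hm := PySem.Int.floordiv_two_mid_bounds (le_of_lt hlt)
      have hmhi : PySem.Int.floordiv (lo + hi) 2 < hi :=
        (PySem.Int.floordiv_lt_iff_lt_mul (by omega)).mpr (by omega)
      set m := PySem.Int.floordiv (lo + hi) 2 with hmdef
      by_cases hc : pvG array m < x
      · rw [if_pos hc]
        obtain ⟨r1, r2, r3, r4⟩ := ih (m + 1) hi (by omega) (by omega) hlen (by omega)
        refine ⟨by omega, r2, ?_, r4⟩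
        intro i hi1 hi2
        rcases lt_or_ge i (m + 1) with h | h
        · exact lt_of_le_of_lt (pvMono array hs (by omega) (by omega) (by omega)) hc
        · exact r3 i h hi2
      · rw [if_neg hc]
        obtain ⟨r1, r2, r3, r4⟩ := ih lo m h0 (by omega) (by omega) (by omega)
        refine ⟨r1, by omega, r3, ?_⟩
        intro i hi1 hi2
        rcases lt_or_ge i m with h | h
        · exact r4 i hi1 h
        · exact le_trans (le_of_not_gt hc) (pvMono array hs (by omega) h (by omega))
    · rw [if_neg hlt]
      exact ⟨le_refl _, h1, fun i hi1 hi2 => by omega, fun i hi1 hi2 => by omega⟩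

-- what B's bisect_right returns, on a sorted window
theorem pvBisectR_spec (array : List Int) (x : Int)
    (hs : List.Pairwise (· ≤ ·) array) :
    ∀ (fuel : Nat) (lo hi : Int), 0 ≤ lo → lo ≤ hi → hi ≤ (array.length : Int) →
      hi - lo ≤ (fuel : Int) →
      lo ≤ pvBisectR array x lo hi fuel ∧ pvBisectR array x lo hi fuel ≤ hi ∧
      (∀ i : Int, lo ≤ i → i < pvBisectR array x lo hi fuel → pvG array i ≤ x) ∧
      (∀ i : Int, pvBisectR array x lo hi fuel ≤ i → i < hi → x < pvG array i) := by
  intro fuel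
  induction fuel with
  | zero =>
    intro lo hi h0 h1 hlen h2
    have : hi = lo := by omega
    subst this
    simp only [pvBisectR]
    exact ⟨le_refl _, le_refl _, fun i hi1 hi2 => by omega, fun i hi1 hi2 => by omega⟩
  | succ f ih =>
    intro lo hi h0 h1 hlen h2
    simp only [pvBisectR]
    by_cases hlt : lo < hi
    · rw [if_pos hlt]
      have hm := PySem.Int.floordiv_two_mid_bounds (le_of_lt hlt)
      have hmhi : PySem.Int.floordiv (lo + hi) 2 < hi :=
        (PySem.Int.floordiv_lt_iff_lt_mul (by omega)).mpr (by omega)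
      set m := PySem.Int.floordiv (lo + hi) 2 with hmdef
      by_cases hc : x < pvG array m
      · rw [if_pos hc]
        obtain ⟨r1, r2, r3, r4⟩ := ih lo m h0 (by omega) (by omega) (by omega)
        refine ⟨r1, by omega, r3, ?_⟩
        intro i hi1 hi2
        rcases lt_or_ge i m with h | h
        · exact r4 i hi1 h
        · exact lt_of_lt_of_le hc (pvMono array hs (by omega) h (by omega))
      · rw [if_neg hc]
        obtain ⟨r1, r2, r3, r4⟩ := ih (m + 1) hi (by omega) (by omega) hlen (by omega)
        refine ⟨by omega, r2, ?_, r4⟩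
        intro i hi1 hi2
        rcases lt_or_ge i (m + 1) with h | h
        · exact le_trans (pvMono array hs (by omega) (by omega) (by omega)) (le_of_not_gt hc)
        · exact r3 i h hi2
    · rw [if_neg hlt]
      exact ⟨le_refl _, h1, fun i hi1 hi2 => by omega, fun i hi1 hi2 => by omega⟩

-- the left run boundary: A's linear scan and B's binary search agree on a sorted window
theorem pvStart_eq (array : List Int) (hs : List.Pairwise (· ≤ ·) array)
    (low mid : Int) (h0 : 0 ≤ low) (h1 : low ≤ mid) (h2 : mid < (array.length : Int)) :
    pvScanL array low (pvG array mid) mid (mid - low).toNat =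
      pvBisectL array (pvG array mid) low mid (mid - low).toNat := by
  set v := pvG array mid with hv
  obtain ⟨s1, s2, s3, s4⟩ := pvScanL_spec array low v (mid - low).toNat mid h1 (Int.self_le_toNat _)
  obtain ⟨b1, b2, b3, b4⟩ := pvBisectL_spec array v hs (mid - low).toNat low mid h0 h1 (by omega)
    (Int.self_le_toNat _)
  set s := pvScanL array low v mid (mid - low).toNat
  set r := pvBisectL array v low mid (mid - low).toNat
  rcases lt_trichotomy r s with h | h | h
  · exfalso
    have hne : pvG array (s - 1) ≠ v := s4 (by omega)
    have hge : v ≤ pvG array (s - 1) := b4 (s - 1) (by omega) (by omega)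
    have hle : pvG array (s - 1) ≤ v := hv ▸ pvMono array hs (by omega) (by omega) h2
    exact hne (le_antisymm hle hge)
  · exact h.symm
  · exfalso
    have h1' : pvG array s < v := b3 s s1 h
    have h2' : pvG array s = v := s3 s (le_refl _) (by omega)
    omega

-- the right run boundary: A's linear scan and B's binary search agree on a sorted window
theorem pvEnd_eq (array : List Int) (hs : List.Pairwise (· ≤ ·) array)
    (mid high : Int) (h0 : 0 ≤ mid) (h1 : mid < high) (h2 : high ≤ (array.length : Int)) :
    pvScanR array high (pvG array mid) mid (high - 1 - mid).toNat =
      pvBisectR array (pvG array mid) (mid + 1) high (high - (mid + 1)).toNat - 1 := by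
  set v := pvG array mid with hv
  obtain ⟨s1, s2, s3, s4⟩ := pvScanR_spec array high v (high - 1 - mid).toNat mid (by omega)
    (Int.self_le_toNat _)
  obtain ⟨b1, b2, b3, b4⟩ := pvBisectR_spec array v hs (high - (mid + 1)).toNat (mid + 1) high
    (by omega) (by omega) h2 (Int.self_le_toNat _)
  set e := pvScanR array high v mid (high - 1 - mid).toNat
  set r := pvBisectR array v (mid + 1) high (high - (mid + 1)).toNat
  rcases lt_trichotomy e (r - 1) with h | h | h
  · exfalso
    have hne : pvG array (e + 1) ≠ v := s4 (by omega)
    have hle : pvG array (e + 1) ≤ v := b3 (e + 1) (by omega) (by omega)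
    have hge : v ≤ pvG array (e + 1) := hv ▸ pvMono array hs h0 (by omega) (by omega)
    exact hne (le_antisymm hle hge)
  · exact h
  · exfalso
    have h1' : v < pvG array r := b4 r (le_refl _) (by omega)
    have h2' : pvG array r = v := s3 r (by omega) (by omega)
    omega

-- the two ports agree, window by window
theorem pvGo_eq (array : List Int) (hs : List.Pairwise (· ≤ ·) array) :
    ∀ (fuel : Nat) (low high : Int), 0 ≤ low → high ≤ (array.length : Int) →
      high - low ≤ (fuel : Int) →
      pvGoA array low high fuel = pvGoB array low high fuel := by
  intro fuel
  induction fuel with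
  | zero =>
    intro low high h0 hlen h2
    simp only [pvGoA, pvGoB]
    rw [if_neg (fun h => absurd h.1 (by omega))]
  | succ f ih =>
    intro low high h0 hlen h2
    simp only [pvGoA, pvGoB]
    rcases lt_trichotomy (high - low) 1 with hcase | hcase | hcase
    · rw [if_pos (by omega : low ≥ high), if_neg (by omega : ¬ high - low > 1),
        if_neg (fun h => absurd h.1 (by omega))]
    · rw [if_neg (by omega : ¬ low ≥ high), if_pos hcase, if_neg (by omega : ¬ high - low > 1)]
      by_cases hg : pvG array low = low
      · rw [if_pos hg, if_pos ⟨hcase, hg⟩]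
      · rw [if_neg hg, if_neg (fun h => hg h.2)]
    · rw [if_neg (by omega : ¬ low ≥ high), if_neg (by omega : ¬ high - low = 1),
        if_pos (by omega : high - low > 1)]
      have hm := PySem.Int.floordiv_two_mid_bounds (by omega : low ≤ high)
      have hmhi : PySem.Int.floordiv (low + high) 2 < high :=
        (PySem.Int.floordiv_lt_iff_lt_mul (by omega)).mpr (by omega)
      set mid := PySem.Int.floordiv (low + high) 2 with hmdef
      rw [← pvStart_eq array hs low mid h0 hm.1 (by omega),
        ← pvEnd_eq array hs mid high (by omega) hmhi hlen]
      set v := pvG array mid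
      obtain ⟨s1, s2, s3, s4⟩ := pvScanL_spec array low v (mid - low).toNat mid hm.1
        (Int.self_le_toNat _)
      obtain ⟨e1, e2, e3, e4⟩ := pvScanR_spec array high v (high - 1 - mid).toNat mid (by omega)
        (Int.self_le_toNat _)
      set ms := pvScanL array low v mid (mid - low).toNat
      set me := pvScanR array high v mid (high - 1 - mid).toNat
      by_cases hmag : ms ≤ v ∧ v ≤ me
      · rw [if_pos hmag, if_pos hmag]
      · rw [if_neg hmag, if_neg hmag]
        by_cases hlow : v < ms
        · rw [if_pos hlow, if_pos hlow]
          exact ih (me + 1) high (by omega) hlen (by omega)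
        · rw [if_neg hlow, if_neg hlow]
          exact ih low ms h0 (by omega) (by omega)

-- ===== VERDICT (by name: the statement is the Claim_ definition above) =====
theorem magic_index_followup_py_spec : Claim_equal_magic_index_followup_py := by
  intro array low high _hdom hpre
  unfold Spec_magic_index_followup_py magic_index_followup_py magic_index_followup_py_alt
  rcases hpre with htriv | ⟨hone, _, _⟩ | ⟨h0, hlen, hs⟩
  · have hf : (high - low).toNat = 0 := by omega
    rw [hf]
    simp only [pvGoA, pvGoB]
    rw [if_neg (fun h => absurd h.1 (by omega))]
  · have hf : (high - low).toNat = 1 := by omega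
    rw [hf]
    simp only [pvGoA, pvGoB]
    rw [if_neg (by omega : ¬ low ≥ high), if_pos hone, if_neg (by omega : ¬ high - low > 1)]
    by_cases hg : pvG array low = low
    · rw [if_pos hg, if_pos ⟨hone, hg⟩]
    · rw [if_neg hg, if_neg (fun hh => hg hh.2)]
  · exact pvGo_eq array hs (high - low).toNat low high h0 hlen (Int.self_le_toNat _)
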